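-- pv_equiv track=rewrite | github.com/AndreiDonreanu/ia-lab4 | pb3.py | hasSame3elements
-- ===== SOURCE A (Python) =====
-- def hasSame3elements(v1,v2):
--
--     set1=set()
--     set2=set()
--     l1=len(v1)-2
--     l2=len(v2)-2
--
--
--     for i in range(l1):
--         rez1=(v1[i],v1[i+1],v1[i+2])
--         set1.add(rez1)
--
--     for i in range(l2):
--         rez2=(v2[i],v2[i+1],v2[i+2])
--         set2.add(rez2)
--
--
--
--
--
--
--     return not set1.isdisjoint(set2)
-- ===== SOURCE B (Python) =====
-- def hasSame3elements(v1, v2):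
--     # Sort the consecutive triples of each list and intersect them with a
--     # two-pointer merge scan (no hash sets, early exit on the first match).
--     t1 = sorted(zip(v1, v1[1:], v1[2:]))
--     t2 = sorted(zip(v2, v2[1:], v2[2:]))
--     i = j = 0
--     while i < len(t1) and j < len(t2):
--         if t1[i] == t2[j]:
--             return True
--         if t1[i] < t2[j]:
--             i += 1
--         else:
--             j += 1
--     return False
-- ===== Notes on version B (the rewrite author's own statement) =====
-- stated objective: alternative
-- what changed: Replaces the two hash sets and isdisjoint by a sort-based intersection: the consecutive triples of each list are materialised with zip, sorted, and intersected by a two-pointer merge scan with early exit.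
import Mathlib
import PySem

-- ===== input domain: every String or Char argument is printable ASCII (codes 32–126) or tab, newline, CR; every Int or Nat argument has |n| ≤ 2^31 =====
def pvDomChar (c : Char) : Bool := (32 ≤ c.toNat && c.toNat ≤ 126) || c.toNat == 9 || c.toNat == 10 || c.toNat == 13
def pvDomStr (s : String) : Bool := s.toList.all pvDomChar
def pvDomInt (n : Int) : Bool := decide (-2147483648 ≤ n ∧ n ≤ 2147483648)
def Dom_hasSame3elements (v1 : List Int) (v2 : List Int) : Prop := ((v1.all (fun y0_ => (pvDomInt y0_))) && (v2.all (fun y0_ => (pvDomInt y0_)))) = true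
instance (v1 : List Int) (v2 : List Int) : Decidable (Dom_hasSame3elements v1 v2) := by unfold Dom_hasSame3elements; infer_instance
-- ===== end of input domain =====

-- B replaces A's two hash sets + isdisjoint by sorting each list's consecutive
-- triples and intersecting the two sorted lists with a two-pointer merge scan.

-- ===== PORT A =====
-- the loop 'for i in range(len(v)-2): set.add((v[i],v[i+1],v[i+2]))' (indices are
-- always in range there, so pyGetD is exact)
def pvTriplesA (v : List Int) : PySem.Set (Int × Int × Int) :=
  (PySem.List.pyRange 0 ((v.length : Int) - 2) 1).foldl
    (fun s i => PySem.Set.add s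
      (PySem.List.pyGetD v i 0, PySem.List.pyGetD v (i + 1) 0, PySem.List.pyGetD v (i + 2) 0))
    PySem.Set.empty

def hasSame3elements (v1 : List Int) (v2 : List Int) : Bool :=
  let set1 := pvTriplesA v1
  let set2 := pvTriplesA v2
  !(PySem.Set.isdisjoint set1 set2)

-- ===== PORT B =====
-- Python's '<' on int triples: lexicographic comparison (exact for int components)
def pvLexLt (a b : Int × Int × Int) : Bool :=
  a.1 < b.1 || (a.1 == b.1 && (a.2.1 < b.2.1 || (a.2.1 == b.2.1 && a.2.2 < b.2.2)))

-- zip(v, v[1:], v[2:])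
def pvZip3 (v : List Int) : List (Int × Int × Int) :=
  List.zip v (List.zip (PySem.List.slice v (some 1) none) (PySem.List.slice v (some 2) none))

-- sorted(ts): Python's stable sort = foldl insertion (PySem.List.sorted_eq_foldl_insertBy),
-- with tuple comparison pvLexLt
def pvSortLex (ts : List (Int × Int × Int)) : List (Int × Int × Int) :=
  ts.foldl (fun acc x => PySem.List.insertBy pvLexLt x acc) []

-- the two-pointer while loop, as structural recursion on the two suffixes t1[i:], t2[j:]
def pvMerge : List (Int × Int × Int) → List (Int × Int × Int) → Bool
  | [], _ => false
  | _ :: _, [] => false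
  | a :: t1, b :: t2 =>
    if a = b then true
    else if pvLexLt a b then pvMerge t1 (b :: t2) else pvMerge (a :: t1) t2
termination_by l1 l2 => l1.length + l2.length
decreasing_by all_goals simp

def hasSame3elements_alt (v1 : List Int) (v2 : List Int) : Bool :=
  pvMerge (pvSortLex (pvZip3 v1)) (pvSortLex (pvZip3 v2))

-- ===== PRECONDITION & SPEC =====
def Spec_hasSame3elements (v1 : List Int) (v2 : List Int) (out : Bool) : Prop := out = hasSame3elements_alt v1 v2
instance (v1 : List Int) (v2 : List Int) (out : Bool) : Decidable (Spec_hasSame3elements v1 v2 out) := by unfold Spec_hasSame3elements; infer_instance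

-- ===== CLAIM (what is proved, stated in full; the proofs are below) =====
def Claim_equal_hasSame3elements : Prop := ∀ (v1 : List Int) (v2 : List Int), Dom_hasSame3elements v1 v2 → Spec_hasSame3elements v1 v2 (hasSame3elements v1 v2)

-- ===== LEMMAS AND PROOFS =====

-- basic facts about the lexicographic comparison
theorem pvLexLt_irrefl (a : Int × Int × Int) : pvLexLt a a = false := by
  obtain ⟨x, y, z⟩ := a; simp [pvLexLt]

theorem pvLexLt_asymm (a b : Int × Int × Int) (h : pvLexLt a b = true) :
    pvLexLt b a = false := by
  obtain ⟨x, y, z⟩ := a; obtain ⟨u, v, w⟩ := b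
  simp [pvLexLt] at h ⊢; omega

theorem pvLexLt_total (a b : Int × Int × Int) (h1 : pvLexLt a b = false) (h2 : a ≠ b) :
    pvLexLt b a = true := by
  obtain ⟨x, y, z⟩ := a; obtain ⟨u, v, w⟩ := b
  simp [pvLexLt] at h1 ⊢
  simp only [ne_eq, Prod.mk.injEq, not_and] at h2
  rcases eq_or_ne x u with rfl | hx
  · rcases eq_or_ne y v with rfl | hy
    · have := h2 rfl rfl; omega
    · omega
  · omega

theorem pvLexLt_lt_of_lt_of_ge (a b y : Int × Int × Int)
    (h1 : pvLexLt a b = true) (h2 : pvLexLt y b = false) : pvLexLt a y = true := by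
  obtain ⟨x1, x2, x3⟩ := a; obtain ⟨u1, u2, u3⟩ := b; obtain ⟨w1, w2, w3⟩ := y
  simp [pvLexLt] at h1 h2 ⊢; omega

theorem pvLexLt_ne (a b : Int × Int × Int) (h : pvLexLt a b = true) : a ≠ b := by
  intro rfl; rw [pvLexLt_irrefl] at h; exact absurd h (by simp)

-- A's triples set: exactly the windows (v[k], v[k+1], v[k+2])
theorem mem_pvTriplesA (v : List Int) (t : Int × Int × Int) :
    t ∈ pvTriplesA v ↔
      ∃ k : Nat, k + 2 < v.length ∧ t = (v.getD k 0, v.getD (k + 1) 0, v.getD (k + 2) 0) := by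
  unfold pvTriplesA
  rw [PySem.Set.mem_foldl_add]
  simp only [PySem.Set.empty, List.not_mem_nil, false_or, PySem.List.mem_pyRange_one]
  constructor
  · rintro ⟨i, ⟨h0, hi⟩, rfl⟩
    refine ⟨i.toNat, by omega, ?_⟩
    have hi1 : PySem.List.pyGetD v i 0 = v.getD i.toNat 0 := by
      conv_lhs => rw [show i = (i.toNat : Int) by omega]
      rw [PySem.List.pyGetD_natCast]
    have hi2 : PySem.List.pyGetD v (i + 1) 0 = v.getD (i.toNat + 1) 0 := by
      rw [show i + 1 = ((i.toNat + 1 : Nat) : Int) by omega, PySem.List.pyGetD_natCast]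
    have hi3 : PySem.List.pyGetD v (i + 2) 0 = v.getD (i.toNat + 2) 0 := by
      rw [show i + 2 = ((i.toNat + 2 : Nat) : Int) by omega, PySem.List.pyGetD_natCast]
    rw [hi1, hi2, hi3]
  · rintro ⟨k, hk, rfl⟩
    refine ⟨(k : Int), ⟨by omega, by omega⟩, ?_⟩
    have h2 : (k : Int) + 1 = ((k + 1 : Nat) : Int) := by omega
    have h3 : (k : Int) + 2 = ((k + 2 : Nat) : Int) := by omega
    rw [h2, h3, PySem.List.pyGetD_natCast, PySem.List.pyGetD_natCast,
      PySem.List.pyGetD_natCast]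

-- B's zipped triples: the same windows
theorem mem_pvZip3 (v : List Int) (t : Int × Int × Int) :
    t ∈ pvZip3 v ↔
      ∃ k : Nat, k + 2 < v.length ∧ t = (v.getD k 0, v.getD (k + 1) 0, v.getD (k + 2) 0) := by
  unfold pvZip3
  rw [PySem.List.slice_from_one, show (2 : Int) = ((2 : Nat) : Int) from rfl,
    PySem.List.slice_from_natCast, show v.tail = v.drop 1 from (List.drop_one).symm]
  rw [List.mem_iff_getElem]
  constructor
  · rintro ⟨k, hk, rfl⟩
    simp only [List.length_zip, List.length_drop] at hk
    refine ⟨k, by omega, ?_⟩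
    have h0 : k < v.length := by omega
    have h1 : k + 1 < v.length := by omega
    have h2 : k + 2 < v.length := by omega
    simp [List.getElem_zip, List.getElem_drop, h0, h1, h2, Nat.add_comm 2 k]
  · rintro ⟨k, hk, rfl⟩
    refine ⟨k, by simp [List.length_zip, List.length_drop]; omega, ?_⟩
    have h0 : k < v.length := by omega
    have h1 : k + 1 < v.length := by omega
    simp [List.getElem_zip, List.getElem_drop, h0, h1, hk, Nat.add_comm 2 k]

-- the insertion sort is a permutation membership-wise
theorem mem_foldl_insertBy (l acc : List (Int × Int × Int)) (x : Int × Int × Int) :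
    x ∈ l.foldl (fun acc y => PySem.List.insertBy pvLexLt y acc) acc ↔ x ∈ acc ∨ x ∈ l := by
  induction l generalizing acc with
  | nil => simp
  | cons y ys ih =>
    simp only [List.foldl_cons, ih, PySem.List.mem_insertBy, List.mem_cons]
    tauto

theorem mem_pvSortLex (l : List (Int × Int × Int)) (x : Int × Int × Int) :
    x ∈ pvSortLex l ↔ x ∈ l := by
  unfold pvSortLex; rw [mem_foldl_insertBy]; simp

-- the insertion sort output is sorted (non-strictly): no later element is lex-below an earlier one
theorem insertBy_pairwise (x : Int × Int × Int) (ys : List (Int × Int × Int))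
    (h : ys.Pairwise (fun a b => pvLexLt b a = false)) :
    (PySem.List.insertBy pvLexLt x ys).Pairwise (fun a b => pvLexLt b a = false) := by
  induction ys with
  | nil => simp [PySem.List.insertBy]
  | cons y ys ih =>
    rw [List.pairwise_cons] at h
    obtain ⟨hy, hys⟩ := h
    simp only [PySem.List.insertBy]
    split
    · rename_i hxy
      refine List.pairwise_cons.mpr ⟨?_, List.pairwise_cons.mpr ⟨hy, hys⟩⟩
      intro z hz
      rcases List.mem_cons.mp hz with rfl | hz
      · exact pvLexLt_asymm _ _ hxy
      · exact pvLexLt_asymm _ _ (pvLexLt_lt_of_lt_of_ge _ _ _ hxy (hy z hz))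
    · rename_i hxy
      refine List.pairwise_cons.mpr ⟨?_, ih hys⟩
      intro z hz
      rcases (PySem.List.mem_insertBy _ _ _ _).mp hz with rfl | hz
      · exact Bool.not_eq_true _ ▸ hxy
      · exact hy z hz

theorem pvSortLex_pairwise (l : List (Int × Int × Int)) :
    (pvSortLex l).Pairwise (fun a b => pvLexLt b a = false) := by
  unfold pvSortLex
  suffices h : ∀ acc : List (Int × Int × Int),
      acc.Pairwise (fun a b => pvLexLt b a = false) →
      (l.foldl (fun acc y => PySem.List.insertBy pvLexLt y acc) acc).Pairwise
        (fun a b => pvLexLt b a = false) from h [] (by simp)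
  induction l with
  | nil => intro acc hacc; simpa using hacc
  | cons y ys ih => intro acc hacc; exact ih _ (insertBy_pairwise y acc hacc)

-- the merge scan on two sorted lists decides intersection
theorem pvMerge_iff (l1 l2 : List (Int × Int × Int))
    (h1 : l1.Pairwise (fun a b => pvLexLt b a = false))
    (h2 : l2.Pairwise (fun a b => pvLexLt b a = false)) :
    pvMerge l1 l2 = true ↔ ∃ x, x ∈ l1 ∧ x ∈ l2 := by
  induction l1, l2 using pvMerge.induct with
  | case1 l2 => simp [pvMerge]
  | case2 a t1 => simp [pvMerge]
  | case3 t1 b t2 =>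
    rw [show pvMerge (b :: t1) (b :: t2) = true from by simp [pvMerge]]
    simp only [true_iff]
    exact ⟨b, by simp, by simp⟩
  | case4 a t1 b t2 hab hlt ih =>
    rw [List.pairwise_cons] at h1
    have ih' := ih h1.2 h2
    simp only [pvMerge, if_neg hab, if_pos hlt, ih']
    constructor
    · rintro ⟨x, hx1, hx2⟩; exact ⟨x, List.mem_cons_of_mem _ hx1, hx2⟩
    · rintro ⟨x, hx1, hx2⟩
      rcases List.mem_cons.mp hx1 with rfl | hx1
      · -- x = a cannot be in b :: t2: a < b ≤ every element of t2
        exfalso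
        rcases List.mem_cons.mp hx2 with rfl | hx2
        · exact hab rfl
        · rw [List.pairwise_cons] at h2
          exact pvLexLt_ne _ _ (pvLexLt_lt_of_lt_of_ge _ _ _ hlt (h2.1 x hx2)) rfl
      · exact ⟨x, hx1, hx2⟩
  | case5 a t1 b t2 hab hlt ih =>
    rw [List.pairwise_cons] at h2
    have hba : pvLexLt b a = true := pvLexLt_total _ _ (by simpa using hlt) hab
    have ih' := ih h1 h2.2
    simp only [pvMerge, if_neg hab, if_neg hlt, ih']
    constructor
    · rintro ⟨x, hx1, hx2⟩; exact ⟨x, hx1, List.mem_cons_of_mem _ hx2⟩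
    · rintro ⟨x, hx1, hx2⟩
      rcases List.mem_cons.mp hx2 with rfl | hx2
      · exfalso
        rcases List.mem_cons.mp hx1 with rfl | hx1
        · exact hab rfl
        · rw [List.pairwise_cons] at h1
          exact pvLexLt_ne _ _ (pvLexLt_lt_of_lt_of_ge _ _ _ hba (h1.1 x hx1)) rfl
      · exact ⟨x, hx1, hx2⟩

-- ===== VERDICT (by name: the statement is the Claim_ definition above) =====
theorem hasSame3elements_spec : Claim_equal_hasSame3elements := by
  intro v1 v2 _
  unfold Spec_hasSame3elements hasSame3elements hasSame3elements_alt
  rw [Bool.eq_iff_iff]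
  rw [pvMerge_iff _ _ (pvSortLex_pairwise _) (pvSortLex_pairwise _)]
  simp only [Bool.not_eq_true', mem_pvSortLex, mem_pvZip3]
  constructor
  · intro hdis
    have hne : ¬ (∀ x ∈ pvTriplesA v1, x ∉ pvTriplesA v2) := by
      intro hall
      exact absurd ((PySem.Set.isdisjoint_iff _ _).mpr hall) (by simp [hdis])
    push Not at hne
    obtain ⟨t, ht1, ht2⟩ := hne
    exact ⟨t, (mem_pvTriplesA v1 t).mp ht1, (mem_pvTriplesA v2 t).mp ht2⟩
  · rintro ⟨t, h1, h2⟩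
    cases hd : PySem.Set.isdisjoint (pvTriplesA v1) (pvTriplesA v2)
    · rfl
    · exact absurd ((mem_pvTriplesA v2 t).mpr h2)
        ((PySem.Set.isdisjoint_iff _ _).mp hd _ ((mem_pvTriplesA v1 t).mpr h1))
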